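-- pv_equiv track=rewrite | github.com/OatmealLiu/VocAda | my_agents/post_processers.py | clean_text_by_word_repetition
-- ===== SOURCE A (Python) =====
-- def clean_text_by_word_repetition(text, repetition_threshold=2):
--     """
--     Cleans the input text by removing lines where any word appears more than the specified threshold.
--
--     Parameters:
--     - text (str): The input text to be cleaned.
--     - repetition_threshold (int): The maximum allowed repetitions of any word in a single line. Lines with words exceeding this count will be removed.
--
--     Returns:
--     - str: The cleaned text with lines removed according to the repetition threshold.
--     """
--     cleaned_lines = []
--
--     # Split the text into lines
--     lines = text.split('\n')
--
--     for line in lines: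
--         # Split each line into words
--         words = line.split()
--
--         # Count the occurrences of each word in the line
--         word_counts = {}
--         for word in words:
--             word_counts[word] = word_counts.get(word, 0) + 1
--
--         # Check if any word exceeds the repetition threshold
--         if not any(count > repetition_threshold for count in word_counts.values()):
--             cleaned_lines.append(line)  # Add line to cleaned lines if it meets criteria
--
--     # Join the cleaned lines back into a single string
--     return '\n'.join(cleaned_lines)
-- ===== SOURCE B (Python) =====
-- def clean_text_by_word_repetition(text, repetition_threshold=2):
--     """Sort each line's words, then scan for a run longer than the threshold."""
--     def line_bad(line):
--         words = sorted(line.split())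
--         prev = None
--         run = 0
--         for w in words:
--             run = run + 1 if w == prev else 1
--             prev = w
--             if run > repetition_threshold:
--                 return True
--         return False
--
--     return '\n'.join(line for line in text.split('\n') if not line_bad(line))
-- ===== Notes on version B (the rewrite author's own statement) =====
-- stated objective: alternative
-- what changed: Per-line dict counting replaced by sorting each line's words and scanning the sorted list for a run longer than the threshold; line filtering done with a generator/filter instead of an accumulator list.
import Mathlib
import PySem

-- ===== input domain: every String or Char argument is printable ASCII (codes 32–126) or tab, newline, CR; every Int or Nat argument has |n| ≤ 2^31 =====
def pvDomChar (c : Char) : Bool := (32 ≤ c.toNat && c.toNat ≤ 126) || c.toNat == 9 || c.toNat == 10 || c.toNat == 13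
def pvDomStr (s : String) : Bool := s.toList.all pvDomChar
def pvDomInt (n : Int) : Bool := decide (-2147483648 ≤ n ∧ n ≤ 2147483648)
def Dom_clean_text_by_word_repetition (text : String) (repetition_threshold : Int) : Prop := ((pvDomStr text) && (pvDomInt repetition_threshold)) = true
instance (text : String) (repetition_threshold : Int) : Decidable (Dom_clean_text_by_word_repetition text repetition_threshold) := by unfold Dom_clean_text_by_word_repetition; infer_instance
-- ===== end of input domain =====

-- B replaces per-line dict counting by sorting the line's words and scanning the sorted
-- list for a run longer than the threshold (alternative decomposition, same result).

-- ===== PORT A =====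
def clean_text_by_word_repetition (text : String) (repetition_threshold : Int) : String :=
  -- lines = text.split('\n')  (separator is the nonempty literal '\n', so split? is always some)
  let lines := (PySem.Str.split? text "\n").getD []
  let cleaned_lines := lines.foldl (fun acc line =>
    let words := PySem.Str.split₀ line
    let word_counts := words.foldl
      (fun d w => d.insert w (d.getD w 0 + 1)) (PySem.Dict.empty : PySem.Dict String Int)
    if !(word_counts.values.any (fun c => decide (c > repetition_threshold))) then
      acc ++ [line]
    else acc) []
  PySem.Str.join "\n" cleaned_lines

-- ===== PORT B =====
-- scan of the sorted word list: run = current run length, prev = previous word (None at start)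
def pvRunScan (t : Int) : List String → Option String → Int → Bool
  | [], _, _ => false
  | w :: ws, prev, run =>
    let run' := if some w == prev then run + 1 else 1
    if run' > t then true else pvRunScan t ws (some w) run'

def pvLineBad (t : Int) (line : String) : Bool :=
  pvRunScan t (PySem.List.sorted (PySem.Str.split₀ line) (fun w => w) false) none 0

def clean_text_by_word_repetition_alt (text : String) (repetition_threshold : Int) : String :=
  PySem.Str.join "\n"
    (((PySem.Str.split? text "\n").getD []).filter
      (fun line => !pvLineBad repetition_threshold line))

-- ===== PRECONDITION & SPEC =====
def Spec_clean_text_by_word_repetition (text : String) (repetition_threshold : Int) (out : String) : Prop := out = clean_text_by_word_repetition_alt text repetition_threshold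
instance (text : String) (repetition_threshold : Int) (out : String) : Decidable (Spec_clean_text_by_word_repetition text repetition_threshold out) := by unfold Spec_clean_text_by_word_repetition; infer_instance

-- ===== CLAIM (what is proved, stated in full; the proofs are below) =====
def Claim_equal_clean_text_by_word_repetition : Prop := ∀ (text : String) (repetition_threshold : Int), Dom_clean_text_by_word_repetition text repetition_threshold → Spec_clean_text_by_word_repetition text repetition_threshold (clean_text_by_word_repetition text repetition_threshold)

-- ===== LEMMAS AND PROOFS =====

-- The scan over a sorted tail: with `run ≤ t` occurrences of `p` already seen and every
-- remaining word ≥ p, the scan fires iff some word's total count exceeds t.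
theorem pvRunScan_some_iff (t : Int) (l : List String) :
    ∀ (p : String) (run : Int), l.Pairwise (· ≤ ·) → (∀ w ∈ l, p ≤ w) → run ≤ t →
    (pvRunScan t l (some p) run = true ↔
      (run + l.count p : Int) > t ∨ ∃ w ∈ l, w ≠ p ∧ (l.count w : Int) > t) := by
  induction l with
  | nil =>
    intro p run _ _ hrun
    simp [pvRunScan]
    omega
  | cons w ws ih =>
    intro p run hpw hge hrun
    have hws : ws.Pairwise (· ≤ ·) := hpw.tail
    have hwle : ∀ u ∈ ws, w ≤ u := fun u hu => (List.pairwise_cons.mp hpw).1 u hu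
    have hcw : ((w :: ws).count w : Int) = 1 + (ws.count w : Int) := by
      rw [List.count_cons_self]; push_cast; ring
    have hcnt0 : (0:Int) ≤ (ws.count w : Int) := Int.natCast_nonneg _
    by_cases hwp : w = p
    · subst hwp
      simp only [pvRunScan, beq_self_eq_true, if_true]
      by_cases hbig : run + 1 > t
      · simp only [if_pos hbig, true_iff]
        left; rw [hcw]; omega
      · simp only [if_neg hbig]
        rw [ih w (run + 1) hws hwle (by omega)]
        constructor
        · rintro (h | ⟨u, hu, hne, hc⟩)
          · left; rw [hcw]; omega
          · right
            refine ⟨u, List.mem_cons_of_mem _ hu, hne, ?_⟩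
            rw [List.count_cons_of_ne (Ne.symm hne)]
            exact hc
        · rintro (h | ⟨u, hu, hne, hc⟩)
          · left; rw [hcw] at h; omega
          · right
            rcases List.mem_cons.mp hu with rfl | hu'
            · exact absurd rfl hne
            · refine ⟨u, hu', hne, ?_⟩
              rw [List.count_cons_of_ne (Ne.symm hne)] at hc
              exact hc
    · -- new word: run resets to 1; p does not occur in w :: ws
      have hplt : p < w := lt_of_le_of_ne (hge w (List.mem_cons_self)) (Ne.symm hwp)
      have hpnot : p ∉ w :: ws := by
        intro hmem
        rcases List.mem_cons.mp hmem with rfl | h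
        · exact hwp rfl
        · exact absurd (hwle p h) (not_le.mpr hplt)
      have hcp : ((w :: ws).count p : Int) = 0 := by
        simp [List.count_eq_zero_of_not_mem hpnot]
      have hbeq : ((some w : Option String) == some p) = false := by
        simp [hwp]
      simp only [pvRunScan, hbeq, Bool.false_eq_true, if_false]
      by_cases hone : (1:Int) > t
      · simp only [if_pos hone, true_iff]
        right
        exact ⟨w, List.mem_cons_self, hwp, by rw [hcw]; omega⟩
      · simp only [if_neg hone]
        rw [ih w 1 hws hwle (by omega)]
        constructor
        · rintro (h | ⟨u, hu, hne, hc⟩)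
          · right
            exact ⟨w, List.mem_cons_self, hwp, by rw [hcw]; omega⟩
          · right
            have hup : u ≠ p := by
              intro h'; subst h'
              exact absurd (hwle u hu) (not_le.mpr hplt)
            refine ⟨u, List.mem_cons_of_mem _ hu, hup, ?_⟩
            rw [List.count_cons_of_ne (Ne.symm hne)]
            exact hc
        · rintro (h | ⟨u, hu, hne, hc⟩)
          · rw [hcp] at h; omega
          · rcases List.mem_cons.mp hu with rfl | hu'
            · left; rw [hcw] at hc; omega
            · by_cases huw : u = w
              · subst huw; left; rw [hcw] at hc; omega
              · right
                refine ⟨u, hu', huw, ?_⟩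
                rw [List.count_cons_of_ne (Ne.symm huw)] at hc
                exact hc

theorem pvRunScan_none_iff (t : Int) (l : List String) (hs : l.Pairwise (· ≤ ·)) :
    pvRunScan t l none 0 = true ↔ ∃ w ∈ l, (l.count w : Int) > t := by
  cases l with
  | nil => simp [pvRunScan]
  | cons w ws =>
    have hws : ws.Pairwise (· ≤ ·) := hs.tail
    have hwle : ∀ u ∈ ws, w ≤ u := fun u hu => (List.pairwise_cons.mp hs).1 u hu
    have hbeq : ((some w : Option String) == none) = false := by rfl
    have hcw : ((w :: ws).count w : Int) = 1 + (ws.count w : Int) := by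
      rw [List.count_cons_self]; push_cast; ring
    have hcnt0 : (0:Int) ≤ (ws.count w : Int) := Int.natCast_nonneg _
    simp only [pvRunScan, hbeq, Bool.false_eq_true, if_false]
    by_cases hone : (1:Int) > t
    · simp only [if_pos hone, true_iff]
      exact ⟨w, List.mem_cons_self, by rw [hcw]; omega⟩
    · simp only [if_neg hone]
      rw [pvRunScan_some_iff t ws w 1 hws hwle (by omega)]
      constructor
      · rintro (h | ⟨u, hu, hne, hc⟩)
        · exact ⟨w, List.mem_cons_self, by rw [hcw]; omega⟩
        · refine ⟨u, List.mem_cons_of_mem _ hu, ?_⟩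
          rw [List.count_cons_of_ne (Ne.symm hne)]
          exact hc
      · rintro ⟨u, hu, hc⟩
        rcases List.mem_cons.mp hu with rfl | hu'
        · left; rw [hcw] at hc; omega
        · by_cases huw : u = w
          · subst huw; left; rw [hcw] at hc; omega
          · right
            refine ⟨u, hu', huw, ?_⟩
            rw [List.count_cons_of_ne (Ne.symm huw)] at hc
            exact hc

-- B's per-line test fires iff some word of the line occurs more than t times.
theorem pvLineBad_iff (t : Int) (line : String) :
    pvLineBad t line = true ↔
      ∃ w ∈ PySem.Str.split₀ line, ((PySem.Str.split₀ line).count w : Int) > t := by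
  unfold pvLineBad
  set ws := PySem.Str.split₀ line with hws
  have hperm : (PySem.List.sorted ws (fun w => w) false).Perm ws :=
    PySem.List.sorted_perm ws (fun w => w) false
  have hpw : (PySem.List.sorted ws (fun w => w) false).Pairwise (· ≤ ·) :=
    PySem.List.sorted_pairwise ws (fun w => w)
  rw [pvRunScan_none_iff t _ hpw]
  constructor
  · rintro ⟨w, hw, hc⟩
    exact ⟨w, hperm.mem_iff.mp hw, by rw [← hperm.count_eq]; exact hc⟩
  · rintro ⟨w, hw, hc⟩
    exact ⟨w, hperm.mem_iff.mpr hw, by rw [hperm.count_eq]; exact hc⟩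

-- A's per-line test (any dict value > t) fires iff some word occurs more than t times.
theorem pvDictAny_iff (t : Int) (line : String) :
    (((PySem.Str.split₀ line).foldl
        (fun d w => d.insert w (d.getD w 0 + 1)) (PySem.Dict.empty : PySem.Dict String Int)).values.any
      (fun c => decide (c > t))) = true ↔
      ∃ w ∈ PySem.Str.split₀ line, ((PySem.Str.split₀ line).count w : Int) > t := by
  set ws := PySem.Str.split₀ line with hws
  rw [PySem.Dict.foldl_insert_getD_add_one_eq_counter]
  rw [PySem.Dict.values_eq_map_keys _ (PySem.Dict.nodup_keys_counter ws) 0]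
  rw [List.any_eq_true]
  constructor
  · rintro ⟨c, hc, hgt⟩
    rcases List.mem_map.mp hc with ⟨k, hk, rfl⟩
    rw [PySem.Dict.keys_counter] at hk
    refine ⟨k, (PySem.Set.mem_ofList _ _).mp hk, ?_⟩
    rw [← PySem.Dict.getD_counter ws k]
    exact of_decide_eq_true hgt
  · rintro ⟨w, hw, hgt⟩
    refine ⟨(PySem.Dict.counter ws).getD w 0, ?_, ?_⟩
    · exact List.mem_map.mpr
        ⟨w, by rw [PySem.Dict.keys_counter]; exact (PySem.Set.mem_ofList _ _).mpr hw, rfl⟩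
    · rw [PySem.Dict.getD_counter ws w]
      exact decide_eq_true hgt

-- A's accumulator loop over the lines is a filter by B's per-line test.
theorem pvFoldl_eq_filter (t : Int) (lines : List String) :
    lines.foldl (fun acc line =>
      if !(((PySem.Str.split₀ line).foldl
            (fun d w => d.insert w (d.getD w 0 + 1)) (PySem.Dict.empty : PySem.Dict String Int)).values.any
          (fun c => decide (c > t))) then acc ++ [line] else acc) [] =
    lines.filter (fun line => !pvLineBad t line) := by
  rw [PySem.List.foldl_append_if (fun line =>
      !(((PySem.Str.split₀ line).foldl
          (fun d w => d.insert w (d.getD w 0 + 1)) (PySem.Dict.empty : PySem.Dict String Int)).values.any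
        (fun c => decide (c > t)))) (fun line => line)]
  rw [List.map_id']
  rw [List.nil_append]
  apply List.filter_congr
  intro line _
  rcases h : pvLineBad t line with hf | ht
  · have h1 : ¬ ∃ w ∈ PySem.Str.split₀ line, ((PySem.Str.split₀ line).count w : Int) > t := by
      rw [← pvLineBad_iff t line]; simp [h]
    have h2 := (not_iff_not.mpr (pvDictAny_iff t line)).mpr h1
    simp only [Bool.not_eq_true] at h2
    simp [h2]
  · have h2 := (pvDictAny_iff t line).mpr ((pvLineBad_iff t line).mp h)
    simp [h2]

-- ===== VERDICT (by name: the statement is the Claim_ definition above) =====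
theorem clean_text_by_word_repetition_spec : Claim_equal_clean_text_by_word_repetition := by
  intro text t _
  unfold Spec_clean_text_by_word_repetition clean_text_by_word_repetition clean_text_by_word_repetition_alt
  exact congrArg (PySem.Str.join "\n") (pvFoldl_eq_filter t ((PySem.Str.split? text "\n").getD []))
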